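-- pv_equiv track=rewrite | github.com/oracle-devrel/technology-engineering | ai/generative-ai-service/complex-document-rag/files/agents/agent_factory.py | _interleave_chunks
-- ===== SOURCE A (Python) =====
-- from typing import List, Dict, Any, ClassVar, Optional
-- from typing import Any, Optional
--
-- def _interleave_chunks(entity_chunks: Dict[str, List[Dict[str, Any]]]) -> List[Dict[str, Any]]:
--     """Interleave chunks from each entity to maintain balanced representation"""
--     interleaved = []
--     max_len = max(len(v) for v in entity_chunks.values())
--
--     for i in range(max_len):
--         for entity in sorted(entity_chunks.keys()):
--             chunks = entity_chunks[entity]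
--             if i < len(chunks):
--                 interleaved.append(chunks[i])
--     return interleaved
-- ===== SOURCE B (Python) =====
-- def _interleave_chunks(entity_chunks):
--     """Interleave chunks from each entity to maintain balanced representation"""
--     cols = [entity_chunks[k] for k in sorted(entity_chunks) if entity_chunks[k]]
--     out = []
--     while cols:
--         out.extend(c[0] for c in cols)
--         cols = [c[1:] for c in cols if len(c) > 1]
--     return out
-- ===== Notes on version B (the rewrite author's own statement) =====
-- stated objective: alternative
-- what changed: B gathers the sorted entities' non-empty chunk lists into columns once and then round-robins: each pass emits every column's head and recurses on the tails of the columns with more than one chunk left, instead of A's index-outer loop that re-sorts the keys and rescans every entity list for each index.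
import Mathlib
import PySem

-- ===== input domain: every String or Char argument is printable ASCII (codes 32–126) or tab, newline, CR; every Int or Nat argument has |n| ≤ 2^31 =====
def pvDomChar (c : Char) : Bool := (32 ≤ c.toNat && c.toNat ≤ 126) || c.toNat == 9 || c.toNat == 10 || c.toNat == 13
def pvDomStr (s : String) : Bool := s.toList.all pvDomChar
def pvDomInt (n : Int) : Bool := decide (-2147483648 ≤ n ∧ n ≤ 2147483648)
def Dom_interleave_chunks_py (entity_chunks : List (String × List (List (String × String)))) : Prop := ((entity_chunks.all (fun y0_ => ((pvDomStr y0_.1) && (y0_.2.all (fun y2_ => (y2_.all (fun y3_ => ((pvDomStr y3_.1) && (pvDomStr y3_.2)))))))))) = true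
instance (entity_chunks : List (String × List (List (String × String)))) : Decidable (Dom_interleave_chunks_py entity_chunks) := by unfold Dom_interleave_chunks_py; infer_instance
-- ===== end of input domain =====

-- B builds the sorted non-empty chunk columns once and round-robins over them,
-- taking every column's head and recursing on the shortened columns, instead of
-- A's index-outer loop that re-sorts the keys and rescans every entity list per index.

-- ===== PORT A =====
def interleave_chunks_py (entity_chunks : List (String × List (List (String × String)))) : List (List (String × String)) :=
  let d := PySem.Dict.ofList entity_chunks
  -- max(...) raises ValueError on an empty dict: Pre_ excludes entity_chunks = []
  let max_len : Int := ((d.values.map (fun (v : List (List (String × String))) => (v.length : Int)))|> (fun l => PySem.List.max? l (fun x => x))).getD 0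
  (PySem.List.pyRange 0 max_len 1).foldl (fun interleaved i =>
    (PySem.List.sorted d.keys (fun k => k) false).foldl (fun interleaved entity =>
      let chunks := d.getD entity []
      if i < (chunks.length : Int) then
        interleaved ++ [(PySem.List.pyGet? chunks i).getD []]
      else interleaved) interleaved) []

-- ===== PORT B =====
-- the 'while cols:' loop of B: each pass emits every column's head and keeps the
-- tails of the columns longer than 1; fuel = total size bounds the pass count
def pvRR (fuel : Nat) (cols : List (List (List (String × String)))) : List (List (String × String)) :=
  match fuel, cols with
  | _, [] => []
  | 0, _ :: _ => []
  | fuel + 1, c0 :: rest =>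
      ((c0 :: rest).map (fun c => PySem.List.pyGetD c 0 [])) ++
        pvRR fuel (((c0 :: rest).filter (fun c => decide (1 < c.length))).map
          (fun c => PySem.List.slice c (some 1) none))

def interleave_chunks_py_alt (entity_chunks : List (String × List (List (String × String)))) : List (List (String × String)) :=
  let d := PySem.Dict.ofList entity_chunks
  let cols := ((PySem.List.sorted d.keys (fun k => k) false).filter
      (fun k => decide (d.getD k [] ≠ []))).map (fun k => d.getD k [])
  pvRR ((cols.map (fun c => c.length + 1)).sum) cols

-- ===== PRECONDITION & SPEC =====
-- Python's max() over the values raises ValueError on an empty dict; Pre_ excludes exactly that.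
def Pre_interleave_chunks_py (entity_chunks : List (String × List (List (String × String)))) : Prop := entity_chunks ≠ []
instance (entity_chunks : List (String × List (List (String × String)))) : Decidable (Pre_interleave_chunks_py entity_chunks) := by unfold Pre_interleave_chunks_py; infer_instance
def pvWitness_interleave_chunks_py : (List (String × List (List (String × String)))) := [("a", [[("k", "v")]])]

def Spec_interleave_chunks_py (entity_chunks : List (String × List (List (String × String)))) (out : List (List (String × String))) : Prop := out = interleave_chunks_py_alt entity_chunks
instance (entity_chunks : List (String × List (List (String × String)))) (out : List (List (String × String))) : Decidable (Spec_interleave_chunks_py entity_chunks out) := by unfold Spec_interleave_chunks_py; infer_instance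

-- ===== CLAIM (what is proved, stated in full; the proofs are below) =====
def Claim_equal_interleave_chunks_py : Prop := ∀ (entity_chunks : List (String × List (List (String × String)))), Dom_interleave_chunks_py entity_chunks → Pre_interleave_chunks_py entity_chunks → Spec_interleave_chunks_py entity_chunks (interleave_chunks_py entity_chunks)


-- ===== LEMMAS AND PROOFS =====

theorem pv_flatMap_congr {α β : Type} (l : List α) (f g : α → List β)
    (h : ∀ x ∈ l, f x = g x) : l.flatMap f = l.flatMap g := by
  induction l with
  | nil => rfl
  | cons x xs ih =>
      simp only [List.flatMap_cons, h x (List.mem_cons_self), ih (fun y hy => h y (List.mem_cons_of_mem _ hy))]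

theorem pv_flatMap_map {α β γ : Type} (l : List α) (f : α → β) (g : β → List γ) :
    (l.map f).flatMap g = l.flatMap (fun x => g (f x)) := by
  induction l with
  | nil => rfl
  | cons x xs ih => simp only [List.map_cons, List.flatMap_cons, ih]

-- one pass of the strip step cannot grow the total-size measure
theorem pv_meas_le (L : List (List (List (String × String)))) :
    (((L.filter (fun c => decide (1 < c.length))).map
        (fun c => PySem.List.slice c (some 1) none)).map (fun c => c.length + 1)).sum
      ≤ ((L.map (fun c => c.length + 1)).sum) := by
  induction L with
  | nil => simp
  | cons c cs ih =>
      simp only [PySem.List.slice_from_one] at ih ⊢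
      simp only [List.filter_cons, List.map_cons, List.sum_cons]
      by_cases h : 1 < c.length
      · rw [if_pos (by simpa using h)]
        simp only [List.map_cons, List.sum_cons, List.length_tail]
        omega
      · rw [if_neg (by simpa using h)]
        omega

theorem pv_filter_map_eq_flatMap (d : PySem.Dict String (List (List (String × String)))) (j : Nat) (L : List String) :
    (L.filter (fun e => decide ((j:Int) < (((d.getD e []).length : Nat) : Int)))).map
        (fun e => (PySem.List.pyGet? (d.getD e []) (j:Int)).getD []) =
      L.flatMap (fun e => ((d.getD e [])[j]?).toList) := by
  induction L with
  | nil => simp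
  | cons e L ih =>
      simp only [List.filter_cons, List.flatMap_cons, PySem.List.pyGet?_natCast, Nat.cast_lt] at ih ⊢
      by_cases hlen : j < (d.getD e []).length
      · rw [if_pos (by simpa using hlen)]
        simp [List.getElem?_eq_getElem hlen, ih]
      · rw [if_neg (by simpa using hlen)]
        rw [List.getElem?_eq_none (by omega : (d.getD e []).length ≤ j)]
        simp [ih]

theorem pv_drop_empty (d : PySem.Dict String (List (List (String × String)))) (j : Nat) (L : List String) :
    L.flatMap (fun e => ((d.getD e [])[j]?).toList) =
      ((L.filter (fun k => decide (d.getD k [] ≠ []))).map (fun k => d.getD k [])).flatMap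
        (fun c => ((c)[j]?).toList) := by
  induction L with
  | nil => rfl
  | cons e L ih =>
      simp only [List.filter_cons, List.flatMap_cons]
      by_cases h : d.getD e [] ≠ []
      · rw [if_pos (by simpa using h)]
        simp only [List.map_cons, List.flatMap_cons, ih]
      · rw [if_neg (by simpa using h)]
        simp only [ne_eq, not_not] at h
        simp [h, ih]

theorem pv_row0 (cols : List (List (List (String × String)))) (hne : ∀ c ∈ cols, c ≠ []) :
    cols.flatMap (fun c => ((c)[0]?).toList) = cols.map (fun c => PySem.List.pyGetD c 0 []) := by
  induction cols with
  | nil => rfl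
  | cons c cs ih =>
      cases c with
      | nil => exact absurd rfl (hne [] List.mem_cons_self)
      | cons x t =>
          simp only [List.flatMap_cons, List.map_cons, PySem.List.pyGetD_zero_cons]
          rw [ih (fun y hy => hne y (List.mem_cons_of_mem _ hy))]
          rfl

theorem pv_shift (cols : List (List (List (String × String)))) (j : Nat) :
    cols.flatMap (fun c => ((c)[j+1]?).toList) =
      ((cols.filter (fun c => decide (1 < c.length))).map
        (fun c => PySem.List.slice c (some 1) none)).flatMap (fun c => ((c)[j]?).toList) := by
  induction cols with
  | nil => rfl
  | cons c cs ih =>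
      simp only [List.filter_cons, List.flatMap_cons]
      by_cases h : 1 < c.length
      · rw [if_pos (by simpa using h)]
        simp only [List.map_cons, List.flatMap_cons, PySem.List.slice_from_one, List.getElem?_tail, ih]
      · rw [if_neg (by simpa using h)]
        rw [List.getElem?_eq_none (by omega : c.length ≤ j + 1)]
        simp [ih]

theorem pv_rr_spec (N : Nat) (cols : List (List (List (String × String)))) (fuel : Nat)
    (hfuel : (cols.map (fun c => c.length + 1)).sum ≤ fuel)
    (hne : ∀ c ∈ cols, c ≠ []) (hlen : ∀ c ∈ cols, c.length ≤ N) :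
    pvRR fuel cols = (List.range N).flatMap (fun j => cols.flatMap (fun c => ((c)[j]?).toList)) := by
  induction N generalizing cols fuel with
  | zero =>
      have hnil : cols = [] := by
        cases cols with
        | nil => rfl
        | cons c cs =>
            have h1 := hne c List.mem_cons_self
            have h2 := hlen c List.mem_cons_self
            cases c with
            | nil => exact absurd rfl h1
            | cons x t => simp at h2
      subst hnil
      cases fuel <;> simp [pvRR]
  | succ N ih =>
      cases cols with
      | nil => cases fuel <;> simp [pvRR]
      | cons c0 rest =>
          have hpos : 1 ≤ fuel := by
            simp only [List.map_cons, List.sum_cons] at hfuel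
            omega
          obtain ⟨f, rfl⟩ : ∃ f, fuel = f + 1 := ⟨fuel - 1, by omega⟩
          rw [pvRR, List.range_succ_eq_map, List.flatMap_cons, pv_flatMap_map]
          rw [pv_row0 (c0 :: rest) hne]
          congr 1
          have hrec := ih (((c0 :: rest).filter (fun c => decide (1 < c.length))).map
              (fun c => PySem.List.slice c (some 1) none)) f
            (by
              -- the head column is non-empty, so one pass strictly shrinks the measure
              have hstrict : (((((c0 :: rest).filter (fun c => decide (1 < c.length))).map
                  (fun c => PySem.List.slice c (some 1) none)).map (fun c => c.length + 1)).sum)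
                    < (((c0 :: rest).map (fun c => c.length + 1)).sum) := by
                have h0 := pv_meas_le rest
                simp only [PySem.List.slice_from_one] at h0 ⊢
                simp only [List.filter_cons, List.map_cons, List.sum_cons] at h0 ⊢
                by_cases h : 1 < c0.length
                · rw [if_pos (by simpa using h)]
                  simp only [List.map_cons, List.sum_cons, List.length_tail]
                  omega
                · rw [if_neg (by simpa using h)]
                  omega
              omega)
            (by
              intro c hc
              obtain ⟨c', hc', rfl⟩ := List.mem_map.mp hc
              have h1 : 1 < c'.length := by
                have := (List.mem_filter.mp hc').2
                simpa using this
              rw [PySem.List.slice_from_one]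
              intro hnil
              have := congrArg List.length hnil
              simp at this
              omega)
            (by
              intro c hc
              obtain ⟨c', hc', rfl⟩ := List.mem_map.mp hc
              have h2 := hlen c' (List.mem_filter.mp hc').1
              rw [PySem.List.slice_from_one]
              simp only [List.length_tail]
              omega)
          rw [hrec]
          apply pv_flatMap_congr
          intro j _
          exact (pv_shift (c0 :: rest) j).symm

-- the first value found for a key in an association list is one of the dict's values
theorem pv_get?_mem_values (items : List (String × List (List (String × String))))
    (k : String) (v : List (List (String × String)))
    (h : (PySem.Dict.mk items).get? k = some v) : v ∈ (PySem.Dict.mk items).values := by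
  induction items with
  | nil => simp [PySem.Dict.get?] at h
  | cons p rest ih =>
      obtain ⟨k0, v0⟩ := p
      rw [PySem.Dict.get?_mk_cons] at h
      by_cases hk : k0 == k
      · rw [if_pos hk] at h
        simp only [PySem.Dict.values]
        simp only [Option.some.injEq] at h
        subst h
        exact List.mem_cons_self
      · rw [if_neg hk] at h
        have := ih h
        simp only [PySem.Dict.values] at this ⊢
        exact List.mem_cons_of_mem _ this

theorem pv_main (d : PySem.Dict String (List (List (String × String)))) :
    (PySem.List.pyRange 0 (((d.values.map (fun (v : List (List (String × String))) => (v.length : Int)))|> (fun l => PySem.List.max? l (fun x => x))).getD 0) 1).foldl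
      (fun interleaved i =>
        (PySem.List.sorted d.keys (fun k => k) false).foldl (fun interleaved entity =>
          let chunks := d.getD entity []
          if i < (chunks.length : Int) then
            interleaved ++ [(PySem.List.pyGet? chunks i).getD []]
          else interleaved) interleaved) []
    = pvRR (((((PySem.List.sorted d.keys (fun k => k) false).filter
        (fun k => decide (d.getD k [] ≠ []))).map (fun k => d.getD k [])).map (fun c => c.length + 1)).sum)
        (((PySem.List.sorted d.keys (fun k => k) false).filter
        (fun k => decide (d.getD k [] ≠ []))).map (fun k => d.getD k [])) := by
  set sk := PySem.List.sorted d.keys (fun k => k) false with hsk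
  set M : Int := ((d.values.map (fun (v : List (List (String × String))) => (v.length : Int)))|> (fun l => PySem.List.max? l (fun x => x))).getD 0 with hM
  set cols := (sk.filter (fun k => decide (d.getD k [] ≠ []))).map (fun k => d.getD k []) with hcols
  have hinner : ∀ (acc : List (List (String × String))) (i : Int), i ∈ PySem.List.pyRange 0 M 1 →
      sk.foldl (fun interleaved entity =>
        let chunks := d.getD entity []
        if i < (chunks.length : Int) then interleaved ++ [(PySem.List.pyGet? chunks i).getD []]
        else interleaved) acc
      = acc ++ (sk.filter (fun e => decide (i < (((d.getD e []).length : Nat) : Int)))).map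
          (fun e => (PySem.List.pyGet? (d.getD e []) i).getD []) := by
    intro acc i _
    exact PySem.List.foldl_append_ite
      (p := fun e => i < (((d.getD e []).length : Nat) : Int))
      (f := fun e => (PySem.List.pyGet? (d.getD e []) i).getD []) sk acc
  rw [PySem.List.foldl_congr_mem (PySem.List.pyRange 0 M 1)
      (fun interleaved (i : Int) => sk.foldl (fun interleaved entity =>
        let chunks := d.getD entity []
        if i < (chunks.length : Int) then interleaved ++ [(PySem.List.pyGet? chunks i).getD []]
        else interleaved) interleaved)
      (fun acc (i : Int) => acc ++ (sk.filter (fun e => decide (i < (((d.getD e []).length : Nat) : Int)))).map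
          (fun e => (PySem.List.pyGet? (d.getD e []) i).getD []))
      ([] : List (List (String × String)))
      hinner]
  rw [PySem.List.foldl_append_eq_flatMap]
  simp only [List.nil_append]
  rw [PySem.List.pyRange_one, pv_flatMap_map]
  simp only [sub_zero, zero_add]
  have hrows : ((List.range M.toNat).flatMap (fun (j : Nat) =>
      (sk.filter (fun e => decide (((j:Int)) < (((d.getD e []).length : Nat) : Int)))).map
        (fun e => (PySem.List.pyGet? (d.getD e []) (j:Int)).getD [])))
      = (List.range M.toNat).flatMap (fun j => cols.flatMap (fun c => ((c)[j]?).toList)) := by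
    apply pv_flatMap_congr
    intro j _
    rw [pv_filter_map_eq_flatMap d j sk, pv_drop_empty d j sk]
  rw [hrows]
  refine (pv_rr_spec M.toNat cols _ le_rfl ?_ ?_).symm
  · intro c hc
    obtain ⟨k, hk, rfl⟩ := List.mem_map.mp hc
    have := (List.mem_filter.mp hk).2
    simpa using this
  · intro c hc
    obtain ⟨k, hk, rfl⟩ := List.mem_map.mp hc
    have hcne : d.getD k [] ≠ [] := by
      have := (List.mem_filter.mp hk).2
      simpa using this
    have hget : d.get? k = some (d.getD k []) := by
      rw [PySem.Dict.getD_eq_get?_getD] at hcne ⊢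
      cases hg : d.get? k with
      | none => rw [hg] at hcne; simp at hcne
      | some v => rfl
    have hmem : d.getD k [] ∈ d.values := by
      obtain ⟨items⟩ := d
      exact pv_get?_mem_values items k _ hget
    have hmem' : (((d.getD k []).length : Nat) : Int) ∈ d.values.map (fun (v : List (List (String × String))) => (v.length : Int)) :=
      List.mem_map.mpr ⟨_, hmem, rfl⟩
    cases hmax : PySem.List.max? (d.values.map (fun (v : List (List (String × String))) => (v.length : Int))) (fun x => x) with
    | none =>
        rw [PySem.List.max?_eq_none_iff] at hmax
        rw [hmax] at hmem'
        simp at hmem'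
    | some m =>
        have hle := PySem.List.max?_isMax hmax _ hmem'
        have hMm : M = m := by rw [hM]; simp [hmax]
        omega

-- ===== VERDICT (by name: the statement is the Claim_ definition above) =====
theorem interleave_chunks_py_spec : Claim_equal_interleave_chunks_py := by
  intro entity_chunks hdom hpre
  unfold Spec_interleave_chunks_py interleave_chunks_py interleave_chunks_py_alt
  exact pv_main _
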